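-- pv_equiv track=rewrite | github.com/georgeglarson/emergent | tools/command_tools.py | _detect_command_type
-- ===== SOURCE A (Python) =====
-- def _detect_command_type(command: str) -> str:
--     """Detect what type of command this is"""
--     cmd_lower = command.lower()
--
--     if any(x in cmd_lower for x in ["pytest", "test", "jest", "cargo test"]):
--         return "test"
--     elif any(x in cmd_lower for x in ["build", "compile", "make"]):
--         return "build"
--     elif any(x in cmd_lower for x in ["run", "execute", "python", "node"]):
--         return "run"
--     elif any(x in cmd_lower for x in ["install", "pip", "npm", "cargo"]):
--         return "install"
--     else:
--         return "other"
-- ===== SOURCE B (Python) =====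
-- # Flat keyword map (alphabetical order): keyword -> (priority, category).
-- _KEYWORDS = {
--     "build": (1, "build"),
--     "cargo": (3, "install"),
--     "cargo test": (0, "test"),
--     "compile": (1, "build"),
--     "execute": (2, "run"),
--     "install": (3, "install"),
--     "jest": (0, "test"),
--     "make": (1, "build"),
--     "node": (2, "run"),
--     "npm": (3, "install"),
--     "pip": (3, "install"),
--     "pytest": (0, "test"),
--     "python": (2, "run"),
--     "run": (2, "run"),
--     "test": (0, "test"),
-- }
--
--
-- def _detect_command_type(command: str) -> str:
--     """Detect what type of command this is: scan ALL keywords once and keep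
--     the match with the smallest priority (= highest-precedence category)."""
--     cmd_lower = command.lower()
--     best = None
--     for kw, (prio, cat) in _KEYWORDS.items():
--         if kw in cmd_lower and (best is None or prio < best[0]):
--             best = (prio, cat)
--     return best[1] if best is not None else "other"
-- ===== Notes on version B (the rewrite author's own statement) =====
-- stated objective: alternative
-- what changed: Replaced the ordered if/elif any-cascade (early return on the first matching category) by a single full pass over a flat alphabetical keyword->(priority,category) map that keeps the minimum-priority match and reads the category off at the end.
import Mathlib
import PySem

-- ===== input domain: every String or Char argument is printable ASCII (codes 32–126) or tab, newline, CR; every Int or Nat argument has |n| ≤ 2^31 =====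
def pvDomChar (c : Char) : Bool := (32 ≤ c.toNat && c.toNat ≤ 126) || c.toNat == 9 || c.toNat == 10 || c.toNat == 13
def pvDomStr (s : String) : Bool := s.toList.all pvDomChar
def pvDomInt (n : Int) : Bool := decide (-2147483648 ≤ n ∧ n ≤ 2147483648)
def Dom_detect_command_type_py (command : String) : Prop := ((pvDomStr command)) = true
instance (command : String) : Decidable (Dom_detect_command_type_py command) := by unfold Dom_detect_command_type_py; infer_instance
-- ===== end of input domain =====

-- B replaces A's early-return if/elif cascade by one full pass over a flat alphabetical
-- keyword->(priority,category) map keeping the minimum-priority match; objective: alternative.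

-- ===== PORT A =====
def detect_command_type_py (command : String) : String :=
  let cmd_lower := PySem.Str.lower command
  if ["pytest", "test", "jest", "cargo test"].any (fun x => PySem.Str.isIn x cmd_lower) then "test"
  else if ["build", "compile", "make"].any (fun x => PySem.Str.isIn x cmd_lower) then "build"
  else if ["run", "execute", "python", "node"].any (fun x => PySem.Str.isIn x cmd_lower) then "run"
  else if ["install", "pip", "npm", "cargo"].any (fun x => PySem.Str.isIn x cmd_lower) then "install"
  else "other"

-- ===== PORT B =====
-- flat keyword map in alphabetical order: keyword, priority, category
def pvKeywordMap : List (String × Nat × String) :=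
  [("build", 1, "build"), ("cargo", 3, "install"), ("cargo test", 0, "test"),
   ("compile", 1, "build"), ("execute", 2, "run"), ("install", 3, "install"),
   ("jest", 0, "test"), ("make", 1, "build"), ("node", 2, "run"),
   ("npm", 3, "install"), ("pip", 3, "install"), ("pytest", 0, "test"),
   ("python", 2, "run"), ("run", 2, "run"), ("test", 0, "test")]

def pvStep (m : String → Bool) (best : Option (Nat × String)) (e : String × Nat × String) :
    Option (Nat × String) :=
  if m e.1 && (match best with | none => true | some b => decide (e.2.1 < b.1)) then some e.2
  else best

def detect_command_type_py_alt (command : String) : String :=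
  let cmd_lower := PySem.Str.lower command
  let best := pvKeywordMap.foldl (pvStep (fun k => PySem.Str.isIn k cmd_lower)) none
  match best with
  | some b => b.2
  | none => "other"

-- ===== PRECONDITION & SPEC =====
def Spec_detect_command_type_py (command : String) (out : String) : Prop := out = detect_command_type_py_alt command
instance (command : String) (out : String) : Decidable (Spec_detect_command_type_py command out) := by unfold Spec_detect_command_type_py; infer_instance

-- ===== CLAIM =====
def Claim_equal_detect_command_type_py : Prop := ∀ (command : String), Dom_detect_command_type_py command → Spec_detect_command_type_py command (detect_command_type_py command)

-- ===== LEMMAS AND PROOFS =====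

-- the same 15 entries, grouped by ascending priority in A's branch/keyword order
def pvOrdered : List (String × Nat × String) :=
  [("pytest", 0, "test"), ("test", 0, "test"), ("jest", 0, "test"), ("cargo test", 0, "test"),
   ("build", 1, "build"), ("compile", 1, "build"), ("make", 1, "build"),
   ("run", 2, "run"), ("execute", 2, "run"), ("python", 2, "run"), ("node", 2, "run"),
   ("install", 3, "install"), ("pip", 3, "install"), ("npm", 3, "install"), ("cargo", 3, "install")]

-- helper evaluations of one pvStep
theorem pvStep_false (m : String → Bool) (z : Option (Nat × String)) (k : String) (p : Nat)
    (c : String) (h : m k = false) : pvStep m z (k, p, c) = z := by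
  simp [pvStep, h]

theorem pvStep_true_none (m : String → Bool) (k : String) (p : Nat) (c : String)
    (h : m k = true) : pvStep m none (k, p, c) = some (p, c) := by
  simp [pvStep, h]

theorem pvStep_true_some (m : String → Bool) (k : String) (p : Nat) (c : String) (q : Nat)
    (w : String) (h : m k = true) :
    pvStep m (some (q, w)) (k, p, c) = if p < q then some (p, c) else some (q, w) := by
  simp [pvStep, h]

theorem pvMin_comm (px py : Nat) (cx cy : String) (h : px = py → cx = cy) :
    (if py < px then some (py, cy) else some (px, cx)) =
      (if px < py then some (px, cx) else some (py, cy) : Option (Nat × String)) := by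
  rcases Nat.lt_trichotomy px py with hlt | heq | hgt
  · rw [if_neg (by omega), if_pos hlt]
  · rw [if_neg (by omega), if_neg (by omega), heq, h heq]
  · rw [if_pos hgt, if_neg (by omega)]

-- pvStep commutes on entries whose category is determined by their priority
theorem pvStep_comm (m : String → Bool) (x y : String × Nat × String)
    (h : x.2.1 = y.2.1 → x.2.2 = y.2.2) (z : Option (Nat × String)) :
    pvStep m (pvStep m z x) y = pvStep m (pvStep m z y) x := by
  obtain ⟨kx, px, cx⟩ := x
  obtain ⟨ky, py, cy⟩ := y
  have h' : px = py → cx = cy := h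
  cases hmx : m kx
  · rw [pvStep_false m z kx px cx hmx, pvStep_false m _ kx px cx hmx]
  · cases hmy : m ky
    · rw [pvStep_false m _ ky py cy hmy, pvStep_false m z ky py cy hmy]
    · rcases z with _ | ⟨q, w⟩
      · rw [pvStep_true_none m kx px cx hmx, pvStep_true_none m ky py cy hmy,
            pvStep_true_some m ky py cy px cx hmy, pvStep_true_some m kx px cx py cy hmx]
        exact pvMin_comm px py cx cy h'
      · rw [pvStep_true_some m kx px cx q w hmx, pvStep_true_some m ky py cy q w hmy]
        by_cases h1 : px < q <;> by_cases h2 : py < q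
        · rw [if_pos h1, if_pos h2, pvStep_true_some m ky py cy px cx hmy,
              pvStep_true_some m kx px cx py cy hmx]
          exact pvMin_comm px py cx cy h'
        · rw [if_pos h1, if_neg h2, pvStep_true_some m ky py cy px cx hmy,
              pvStep_true_some m kx px cx q w hmx, if_neg (by omega), if_pos h1]
        · rw [if_neg h1, if_pos h2, pvStep_true_some m ky py cy q w hmy,
              pvStep_true_some m kx px cx py cy hmx, if_pos h2, if_neg (by omega)]
        · rw [if_neg h1, if_neg h2, pvStep_true_some m ky py cy q w hmy,
              pvStep_true_some m kx px cx q w hmx, if_neg h1, if_neg h2]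

-- a state of minimal priority absorbs every later entry of priority ≥ p
theorem pvFold_skip (m : String → Bool) (p : Nat) (v : String) :
    ∀ l : List (String × Nat × String), (∀ e ∈ l, p ≤ e.2.1) →
      List.foldl (pvStep m) (some (p, v)) l = some (p, v) := by
  intro l
  induction l with
  | nil => intro _; rfl
  | cons e r ih =>
    intro h
    have he : p ≤ e.2.1 := h e (List.mem_cons_self)
    have hstep : pvStep m (some (p, v)) e = some (p, v) := by
      simp only [pvStep]
      have : ¬ e.2.1 < p := by omega
      simp [this]
    simp only [List.foldl, hstep]
    exact ih (fun e' he' => h e' (List.mem_cons_of_mem _ he'))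

-- a whole same-priority group, started from none, yields its value iff some keyword matched
theorem pvFold_group (m : String → Bool) (p : Nat) (v : String) :
    ∀ kws : List String,
      List.foldl (pvStep m) none (kws.map (fun k => (k, p, v))) =
        if kws.any m then some (p, v) else none := by
  intro kws
  induction kws with
  | nil => rfl
  | cons k r ih =>
    simp only [List.map, List.foldl, List.any_cons]
    by_cases hk : m k = true
    · have h1 : pvStep m none (k, p, v) = some (p, v) := by simp [pvStep, hk]
      rw [h1, pvFold_skip m p v]
      · simp [hk]
      · intro e he
        obtain ⟨k', -, rfl⟩ := List.mem_map.mp he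
        exact Nat.le_refl p
    · have hk' : m k = false := by simpa using hk
      have h1 : pvStep m none (k, p, v) = none := by simp [pvStep, hk']
      rw [h1, ih]
      simp [hk']

theorem pvPerm : pvKeywordMap.Perm pvOrdered := by decide

theorem pvPair : ∀ x ∈ pvKeywordMap, ∀ y ∈ pvKeywordMap, x.2.1 = y.2.1 → x.2.2 = y.2.2 := by
  decide

theorem pvFold_eq_ordered (m : String → Bool) :
    List.foldl (pvStep m) none pvKeywordMap = List.foldl (pvStep m) none pvOrdered :=
  pvPerm.foldl_eq' (fun x hx y hy z => pvStep_comm m x y (pvPair x hx y hy) z) none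

-- ===== VERDICT =====
theorem detect_command_type_py_spec : Claim_equal_detect_command_type_py := by
  intro command _
  unfold Spec_detect_command_type_py detect_command_type_py detect_command_type_py_alt
  dsimp only []
  set m : String → Bool := fun k => PySem.Str.isIn k (PySem.Str.lower command) with hm
  rw [pvFold_eq_ordered m]
  have hsplit : pvOrdered =
      (["pytest", "test", "jest", "cargo test"].map (fun k => (k, 0, "test"))) ++
      (["build", "compile", "make"].map (fun k => (k, 1, "build"))) ++
      (["run", "execute", "python", "node"].map (fun k => (k, 2, "run"))) ++
      (["install", "pip", "npm", "cargo"].map (fun k => (k, 3, "install"))) := rfl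
  rw [hsplit, List.foldl_append, List.foldl_append, List.foldl_append]
  by_cases h0 : ["pytest", "test", "jest", "cargo test"].any m = true
  · rw [pvFold_group, if_pos h0, if_pos h0, pvFold_skip, pvFold_skip, pvFold_skip]
    · intro e he
      obtain ⟨k', -, rfl⟩ := List.mem_map.mp he
      simp
    · intro e he
      obtain ⟨k', -, rfl⟩ := List.mem_map.mp he
      simp
    · intro e he
      obtain ⟨k', -, rfl⟩ := List.mem_map.mp he
      simp
  · rw [pvFold_group, if_neg h0, if_neg h0]
    by_cases h1 : ["build", "compile", "make"].any m = true
    · rw [pvFold_group, if_pos h1, if_pos h1, pvFold_skip, pvFold_skip]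
      · intro e he
        obtain ⟨k', -, rfl⟩ := List.mem_map.mp he
        simp
      · intro e he
        obtain ⟨k', -, rfl⟩ := List.mem_map.mp he
        simp
    · rw [pvFold_group, if_neg h1, if_neg h1]
      by_cases h2 : ["run", "execute", "python", "node"].any m = true
      · rw [pvFold_group, if_pos h2, if_pos h2, pvFold_skip]
        intro e he
        obtain ⟨k', -, rfl⟩ := List.mem_map.mp he
        simp
      · rw [pvFold_group, if_neg h2, if_neg h2]
        by_cases h3 : ["install", "pip", "npm", "cargo"].any m = true
        · rw [pvFold_group, if_pos h3, if_pos h3]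
        · rw [pvFold_group, if_neg h3, if_neg h3]
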